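-- pv_equiv track=rewrite | github.com/workspacehome0/blockchain_rat | administrator/payload_generator.py | _extract_agent_main_code
-- ===== SOURCE A (Python) =====
-- def _extract_agent_main_code(code):
--     """Extract main agent functions"""
--     # Remove imports and if __name__ == "__main__" block
--     lines = code.split('\n')
--     main_lines = []
--     skip_imports = True
--
--     for line in lines:
--         if skip_imports:
--             if line.startswith('import ') or line.startswith('from '):
--                 continue
--             if line.strip() == '':
--                 continue
--             skip_imports = False
--
--         if 'if __name__' in line:
--             break
--
--         main_lines.append(line)
--
--     return '\n'.join(main_lines)
-- ===== SOURCE B (Python) =====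
-- def _extract_agent_main_code(code):
--     """Extract main agent functions (two-pass: drop prologue, then take until __main__)."""
--     lines = code.split('\n')
--
--     def _prologue(line):
--         return line.startswith('import ') or line.startswith('from ') or line.strip() == ''
--
--     # pass 1: drop the leading import/blank prologue
--     i = 0
--     while i < len(lines) and _prologue(lines[i]):
--         i += 1
--     body = lines[i:]
--
--     # pass 2: keep body lines up to (excluding) the first 'if __name__' line
--     j = 0
--     while j < len(body) and 'if __name__' not in body[j]:
--         j += 1
--
--     return '\n'.join(body[:j])
-- ===== Notes on version B (the rewrite author's own statement) =====
-- stated objective: alternative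
-- what changed: Replaces the single stateful loop with its skip_imports flag and break by two composed passes: the first scan drops the leading import/blank prologue, the second takes body lines up to the first __main__ guard, then join.
import Mathlib
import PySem

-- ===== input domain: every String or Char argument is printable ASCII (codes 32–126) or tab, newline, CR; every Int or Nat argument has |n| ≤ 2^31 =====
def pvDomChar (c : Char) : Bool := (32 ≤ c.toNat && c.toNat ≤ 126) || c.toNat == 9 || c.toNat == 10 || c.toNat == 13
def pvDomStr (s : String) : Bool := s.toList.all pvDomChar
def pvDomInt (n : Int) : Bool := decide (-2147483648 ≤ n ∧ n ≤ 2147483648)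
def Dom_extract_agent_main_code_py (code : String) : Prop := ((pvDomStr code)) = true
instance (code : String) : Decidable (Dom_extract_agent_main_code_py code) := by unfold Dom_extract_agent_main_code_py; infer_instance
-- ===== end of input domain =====

-- B replaces A's single stateful loop (skip_imports flag + break) by two composed passes:
-- drop the import/blank prologue, then take body lines until the first 'if __name__' line.

-- ===== PORT A =====
-- A's single loop: state = accumulated lines + skip_imports flag; 'break' returns acc.
def pvLoopA (ls : List String) (acc : List String) (skip : Bool) : List String :=
  match ls with
  | [] => acc
  | l :: rest =>
    if skip && (PySem.Str.startswith l "import " || PySem.Str.startswith l "from ") then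
      pvLoopA rest acc skip
    else if skip && (PySem.Str.strip l == "") then
      pvLoopA rest acc skip
    else if PySem.Str.isIn "if __name__" l then
      acc
    else
      pvLoopA rest (acc ++ [l]) false

def extract_agent_main_code_py (code : String) : String :=
  PySem.Str.join "\n" (pvLoopA ((PySem.Str.split? code "\n").getD []) [] true)

-- ===== PORT B =====
def pvPrologue (l : String) : Bool :=
  PySem.Str.startswith l "import " || PySem.Str.startswith l "from " || (PySem.Str.strip l == "")

-- pass 1 of Source B: advance past the prologue, keep the rest
def pvDropPro : List String → List String
  | [] => []
  | l :: rest => if pvPrologue l then pvDropPro rest else l :: rest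

-- pass 2 of Source B: keep lines until the first one containing 'if __name__'
def pvTakeBody : List String → List String
  | [] => []
  | l :: rest =>
    if PySem.Str.isIn "if __name__" l then [] else l :: pvTakeBody rest

def extract_agent_main_code_py_alt (code : String) : String :=
  PySem.Str.join "\n" (pvTakeBody (pvDropPro ((PySem.Str.split? code "\n").getD [])))

-- ===== PRECONDITION & SPEC =====
def Spec_extract_agent_main_code_py (code : String) (out : String) : Prop := out = extract_agent_main_code_py_alt code
instance (code : String) (out : String) : Decidable (Spec_extract_agent_main_code_py code out) := by unfold Spec_extract_agent_main_code_py; infer_instance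

-- ===== CLAIM (what is proved, stated in full; the proofs are below) =====
def Claim_equal_extract_agent_main_code_py : Prop := ∀ (code : String), Dom_extract_agent_main_code_py code → Spec_extract_agent_main_code_py code (extract_agent_main_code_py code)

-- ===== LEMMAS AND PROOFS =====

-- Once skip_imports is false, A's loop appends until the first 'if __name__' line: pass 2.
theorem pvLoopA_false (ls acc : List String) :
    pvLoopA ls acc false = acc ++ pvTakeBody ls := by
  induction ls generalizing acc with
  | nil => simp [pvLoopA, pvTakeBody]
  | cons l rest ih =>
    simp only [pvLoopA, pvTakeBody, Bool.false_and, if_neg (by simp : ¬ (false = true))]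
    split
    · simp
    · rw [ih]; simp

-- While skip_imports is true, A's loop discards exactly the prologue: pass 1.
theorem pvLoopA_true (ls acc : List String) :
    pvLoopA ls acc true = pvLoopA (pvDropPro ls) acc false := by
  induction ls with
  | nil => simp [pvLoopA, pvDropPro]
  | cons l rest ih =>
    by_cases hp : pvPrologue l = true
    · have hd : pvDropPro (l :: rest) = pvDropPro rest := by simp [pvDropPro, hp]
      rw [hd, ← ih]
      unfold pvPrologue at hp
      simp only [pvLoopA, Bool.true_and]
      by_cases h1 : (PySem.Str.startswith l "import " || PySem.Str.startswith l "from ") = true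
      · rw [if_pos h1]
      · rw [if_neg h1]
        have h2 : (PySem.Str.strip l == "") = true := by
          rcases Bool.or_eq_true_iff.mp hp with h | h
          · exact absurd h h1
          · exact h
        rw [if_pos h2]
    · have hd : pvDropPro (l :: rest) = l :: rest := by simp [pvDropPro, hp]
      rw [hd]
      obtain ⟨h12, h3⟩ := Bool.or_eq_false_iff.mp (Bool.eq_false_iff.mpr hp)
      simp only [pvLoopA, Bool.true_and]
      rw [if_neg (by rw [h12]; exact Bool.false_ne_true),
          if_neg (by rw [h3]; exact Bool.false_ne_true)]
      simp only [Bool.false_and, Bool.false_eq_true, if_false]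

-- ===== VERDICT (by name: the statement is the Claim_ definition above) =====
theorem extract_agent_main_code_py_spec : Claim_equal_extract_agent_main_code_py := by
  intro code _
  unfold Spec_extract_agent_main_code_py extract_agent_main_code_py extract_agent_main_code_py_alt
  rw [pvLoopA_true, pvLoopA_false, List.nil_append]
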